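-- pv_equiv track=rewrite | github.com/seamusmalley/advent-of-code-2025 | day-7/utils.py | split_timelines
-- ===== SOURCE A (Python) =====
-- from typing import List, Tuple, Dict
--
-- def split_timelines(beam_count_map: Dict[int, int], row: str) -> Tuple[int, Dict[int, int]]:
--     if not beam_count_map:
--         return 1, {row.find('S'): 1}
--
--     timelines_added = 0
--     beams_out = {}
--     for index in beam_count_map:
--         # split the timeline
--         if row[index] == '^':
--             # each split creates a new timeline for each existing timeline that reaches this split
--             timelines_added += beam_count_map[index]
--             if index > 0:
--                 if beams_out.get(index-1):
--                     beams_out[index-1] += beam_count_map[index]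
--                 else:
--                     beams_out[index-1] = beam_count_map[index]
--             if index < len(row)-1:
--                 if beams_out.get(index+1):
--                     beams_out[index+1] += beam_count_map[index]
--                 else:
--                     beams_out[index+1] = beam_count_map[index]
--         else:
--             if beams_out.get(index):
--                 beams_out[index] += beam_count_map[index]
--             else:
--                 beams_out[index] = beam_count_map[index]
--
--     return timelines_added, beams_out
-- ===== SOURCE B (Python) =====
-- def split_timelines(beam_count_map, row):
--     if not beam_count_map:
--         return 1, {row.find('S'): 1}
--     return _solve(list(beam_count_map.items()), row)
--
-- def _solve(items, row):
--     # divide and conquer: solve each half, then merge the partial count-maps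
--     if len(items) == 1:
--         index, count = items[0]
--         if row[index] == '^':
--             out = {}
--             if index > 0:
--                 out[index - 1] = count
--             if index < len(row) - 1:
--                 out[index + 1] = count
--             return count, out
--         return 0, {index: count}
--     mid = len(items) // 2
--     t1, d1 = _solve(items[:mid], row)
--     t2, d2 = _solve(items[mid:], row)
--     for k, v in d2.items():
--         d1[k] = d1.get(k, 0) + v
--     return t1 + t2, d1
-- ===== Notes on version B (the rewrite author's own statement) =====
-- stated objective: alternative
-- what changed: Replaces A's single left-to-right fold with interleaved dict updates by a divide-and-conquer recursion: solve each half of the beam map independently and merge the two partial count-maps; the timeline count is summed through the recursion instead of a running accumulator.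
import Mathlib
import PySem

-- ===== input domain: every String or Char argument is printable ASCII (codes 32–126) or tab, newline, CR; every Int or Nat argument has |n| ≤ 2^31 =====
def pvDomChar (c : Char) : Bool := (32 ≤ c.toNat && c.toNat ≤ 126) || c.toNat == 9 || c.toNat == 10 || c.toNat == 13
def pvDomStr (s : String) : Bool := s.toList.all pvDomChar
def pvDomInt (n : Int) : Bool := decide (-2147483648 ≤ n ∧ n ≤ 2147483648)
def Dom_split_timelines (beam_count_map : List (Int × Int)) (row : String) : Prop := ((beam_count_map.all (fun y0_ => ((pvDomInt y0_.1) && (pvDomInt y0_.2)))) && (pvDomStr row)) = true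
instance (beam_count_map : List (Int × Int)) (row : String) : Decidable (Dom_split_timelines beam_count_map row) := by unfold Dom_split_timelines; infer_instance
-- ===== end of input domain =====

-- B replaces A's single left-to-right fold by a divide-and-conquer recursion (solve each half
-- of the beam map, then merge the two partial count-maps); return values agree on Pre_.
-- Both versions model the Python dicts as insertion-ordered association lists (first-match
-- lookup, overwrite-in-place, new keys appended) — exactly Python dict semantics.

-- ===== PORT A =====
-- d.get(k) / d[k] lookup: first match
def dGet? : List (Int × Int) → Int → Option Int
  | [], _ => none
  | (k, v) :: t, x => if k = x then some v else dGet? t x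

-- d[k] = v : overwrite in place if present, else append
def dSet : List (Int × Int) → Int → Int → List (Int × Int)
  | [], k, c => [(k, c)]
  | (k', v) :: t, k, c => if k' = k then (k', c) :: t else (k', v) :: dSet t k c

-- A's `if beams_out.get(k): beams_out[k] += c else: beams_out[k] = c`
def pvBumpA (d : List (Int × Int)) (k c : Int) : List (Int × Int) :=
  match dGet? d k with
  | some v => if v ≠ 0 then dSet d k (v + c) else dSet d k c
  | none => dSet d k c

-- one iteration of A's `for index in beam_count_map` loop (state = (timelines_added, beams_out));
-- `row[index]` via pyGet?: the `none` (IndexError) case falls to the else branch, outside Pre_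
def pvStepA (row : String) (st : Int × List (Int × Int)) (kv : Int × Int) : Int × List (Int × Int) :=
  if PySem.Str.pyGet? row kv.1 = some '^' then
    (st.1 + kv.2,
      let d1 := if kv.1 > 0 then pvBumpA st.2 (kv.1 - 1) kv.2 else st.2
      if kv.1 < (PySem.Str.len row : Int) - 1 then pvBumpA d1 (kv.1 + 1) kv.2 else d1)
  else (st.1, pvBumpA st.2 kv.1 kv.2)

def split_timelines (beam_count_map : List (Int × Int)) (row : String) : Int × (List (Int × Int)) :=
  if beam_count_map = [] then (1, [(PySem.Str.find row "S", 1)])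
  else beam_count_map.foldl (pvStepA row) (0, [])

-- ===== PORT B =====
-- Source B's merge step: d1[k] = d1.get(k, 0) + v
def pvMergeStep (d : List (Int × Int)) (kv : Int × Int) : List (Int × Int) :=
  dSet d kv.1 ((dGet? d kv.1).getD 0 + kv.2)

-- Source B's _solve: divide and conquer on the item list
def pvSolve (row : String) (items : List (Int × Int)) : Int × List (Int × Int) :=
  if h : items.length ≤ 1 then
    match items with
    | [] => (0, [])   -- never reached from split_timelines_alt (guard for totality)
    | (index, count) :: _ =>
      if PySem.Str.pyGet? row index = some '^' then
        (count,
          let o1 : List (Int × Int) := if index > 0 then dSet [] (index - 1) count else []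
          if index < (PySem.Str.len row : Int) - 1 then dSet o1 (index + 1) count else o1)
      else (0, [(index, count)])
  else
    let mid := items.length / 2
    let r1 := pvSolve row (items.take mid)
    let r2 := pvSolve row (items.drop mid)
    (r1.1 + r2.1, r2.2.foldl pvMergeStep r1.2)
termination_by items.length
decreasing_by
  · simp [List.length_take]; omega
  · simp; omega

def split_timelines_alt (beam_count_map : List (Int × Int)) (row : String) : Int × (List (Int × Int)) :=
  if beam_count_map = [] then (1, [(PySem.Str.find row "S", 1)])
  else pvSolve row beam_count_map

-- ===== PRECONDITION & SPEC =====
-- Pre_ excludes (a) entries whose index is outside [-len(row), len(row)), where Python's row[index]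
-- raises IndexError, and (b) association lists with duplicate keys, which a Python dict argument
-- cannot represent (dict construction collapses them, so the list is not a faithful image of A's input).
def Pre_split_timelines (beam_count_map : List (Int × Int)) (row : String) : Prop :=
  beam_count_map = [] ∨
    ((beam_count_map.map Prod.fst).Nodup ∧
      ∀ kv ∈ beam_count_map, -(row.toList.length : Int) ≤ kv.1 ∧ kv.1 < (row.toList.length : Int))
instance (beam_count_map : List (Int × Int)) (row : String) : Decidable (Pre_split_timelines beam_count_map row) := by unfold Pre_split_timelines; infer_instance
def pvWitness_split_timelines : (List (Int × Int)) × String := ([(1, 2), (0, 3)], "^.^")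

def Spec_split_timelines (beam_count_map : List (Int × Int)) (row : String) (out : Int × (List (Int × Int))) : Prop := out = split_timelines_alt beam_count_map row
instance (beam_count_map : List (Int × Int)) (row : String) (out : Int × (List (Int × Int))) : Decidable (Spec_split_timelines beam_count_map row out) := by unfold Spec_split_timelines; infer_instance

-- ===== CLAIM (what is proved, stated in full; the proofs are below) =====
def Claim_equal_split_timelines : Prop := ∀ (beam_count_map : List (Int × Int)) (row : String), Dom_split_timelines beam_count_map row → Pre_split_timelines beam_count_map row → Spec_split_timelines beam_count_map row (split_timelines beam_count_map row)

-- ===== LEMMAS AND PROOFS =====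

-- canonical forms both programs are reduced to --------------------------------

-- add c at key k (combining lookup-and-overwrite into one traversal)
def dAdd : List (Int × Int) → Int → Int → List (Int × Int)
  | [], k, c => [(k, c)]
  | (k', v) :: t, k, c => if k' = k then (k', v + c) :: t else (k', v) :: dAdd t k c

def dAddP (d : List (Int × Int)) (kv : Int × Int) : List (Int × Int) := dAdd d kv.1 kv.2

-- contributions of one (index, count) entry
def pvContrib (row : String) (kv : Int × Int) : List (Int × Int) :=
  if PySem.Str.pyGet? row kv.1 = some '^' then
    (if kv.1 > 0 then [(kv.1 - 1, kv.2)] else []) ++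
      (if kv.1 < (PySem.Str.len row : Int) - 1 then [(kv.1 + 1, kv.2)] else [])
  else [(kv.1, kv.2)]

def pvAgg (row : String) (l : List (Int × Int)) : List (Int × Int) :=
  (l.flatMap (pvContrib row)).foldl dAddP []

def pvT (row : String) (l : List (Int × Int)) : Int :=
  ((l.filter (fun kv => PySem.Str.pyGet? row kv.1 == some '^')).map Prod.snd).sum

-- basic dict lemmas -----------------------------------------------------------

theorem pvMergeStep_eq (d : List (Int × Int)) (kv : Int × Int) :
    pvMergeStep d kv = dAddP d kv := by
  obtain ⟨k, c⟩ := kv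
  induction d with
  | nil => simp [pvMergeStep, dGet?, dSet, dAddP, dAdd]
  | cons x t ih =>
    obtain ⟨k', v⟩ := x
    by_cases h : k' = k <;>
      simp_all [pvMergeStep, dGet?, dSet, dAddP, dAdd]

theorem pvBumpA_eq (d : List (Int × Int)) (k c : Int) :
    pvBumpA d k c = dAdd d k c := by
  induction d with
  | nil => simp [pvBumpA, dGet?, dSet, dAdd]
  | cons x t ih =>
    obtain ⟨k', v⟩ := x
    by_cases h : k' = k
    · subst h
      by_cases hv : v = 0 <;> simp [pvBumpA, dGet?, dSet, dAdd, hv]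
    · cases hg : dGet? t k <;>
        simp_all [pvBumpA, dGet?, dSet, dAdd]; split_ifs <;> simp_all

theorem dAdd_dAdd_self (d : List (Int × Int)) (k a b : Int) :
    dAdd (dAdd d k a) k b = dAdd d k (a + b) := by
  induction d with
  | nil => simp [dAdd]
  | cons x t ih =>
    obtain ⟨k', v⟩ := x
    by_cases h : k' = k <;> simp [dAdd, h, add_assoc, ih]

theorem mem_keys_dAdd (d : List (Int × Int)) (k k' c : Int) (h : k ∈ d.map Prod.fst) :
    k ∈ (dAdd d k' c).map Prod.fst := by
  induction d with
  | nil => simp at h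
  | cons x t ih =>
    obtain ⟨k0, v⟩ := x
    by_cases h0 : k0 = k' <;> simp_all [dAdd] <;> tauto

theorem mem_keys_dAdd_self (d : List (Int × Int)) (k c : Int) :
    k ∈ (dAdd d k c).map Prod.fst := by
  induction d with
  | nil => simp [dAdd]
  | cons x t ih =>
    obtain ⟨k0, v⟩ := x
    by_cases h0 : k0 = k <;> simp_all [dAdd]

-- dAdd at a key already present commutes with any other dAdd
theorem dAdd_comm_of_mem (d : List (Int × Int)) (k1 c1 k2 c2 : Int)
    (h : k2 ∈ d.map Prod.fst) :
    dAdd (dAdd d k1 c1) k2 c2 = dAdd (dAdd d k2 c2) k1 c1 := by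
  by_cases hk : k1 = k2
  · subst hk; rw [dAdd_dAdd_self, dAdd_dAdd_self, add_comm]
  · induction d with
    | nil => simp at h
    | cons x t ih =>
      obtain ⟨k0, v⟩ := x
      by_cases h1 : k0 = k1
      · subst h1
        have h2 : ¬ (k0 = k2) := hk
        simp_all [dAdd]
      · by_cases h2 : k0 = k2
        · subst h2; simp_all [dAdd]
        · cases h with
          | head => exact absurd rfl h2
          | tail _ hx => simp [dAdd, h1, h2, ih hx]

-- fold a list of contributions over d: an already-present key's dAdd can be pulled out
theorem foldl_dAddP_dAdd_of_mem (t : List (Int × Int)) :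
    ∀ (d : List (Int × Int)) (k c : Int), k ∈ d.map Prod.fst →
      t.foldl dAddP (dAdd d k c) = dAdd (t.foldl dAddP d) k c := by
  induction t with
  | nil => intro d k c _; simp
  | cons x t ih =>
    intro d k c hk
    rw [List.foldl_cons, List.foldl_cons]
    show t.foldl dAddP (dAddP (dAdd d k c) x) = dAdd (t.foldl dAddP (dAddP d x)) k c
    rw [show dAddP (dAdd d k c) x = dAdd (dAdd d k c) x.1 x.2 from rfl,
        ← dAdd_comm_of_mem d x.1 x.2 k c hk]
    exact ih (dAdd d x.1 x.2) k c (mem_keys_dAdd d k x.1 x.2 hk)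

-- merging an aggregated dict e into d = folding e's items into d directly
theorem foldl_dAddP_dAdd (e : List (Int × Int)) :
    ∀ (d : List (Int × Int)) (k c : Int),
      (dAdd e k c).foldl dAddP d = dAdd (e.foldl dAddP d) k c := by
  induction e with
  | nil => intro d k c; simp [dAdd, dAddP]
  | cons x t ih =>
    intro d k c
    obtain ⟨k', v⟩ := x
    by_cases h : k' = k
    · subst h
      rw [show dAdd ((k', v) :: t) k' c = (k', v + c) :: t by simp [dAdd],
          List.foldl_cons, List.foldl_cons]
      show t.foldl dAddP (dAdd d k' (v + c)) = dAdd (t.foldl dAddP (dAdd d k' v)) k' c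
      rw [← dAdd_dAdd_self d k' v c]
      exact foldl_dAddP_dAdd_of_mem t (dAdd d k' v) k' c (mem_keys_dAdd_self d k' v)
    · rw [show dAdd ((k', v) :: t) k c = (k', v) :: dAdd t k c by simp [dAdd, h],
          List.foldl_cons, List.foldl_cons]
      exact ih (dAddP d (k', v)) k c

theorem foldl_dAddP_of_foldl (l : List (Int × Int)) :
    ∀ (e d : List (Int × Int)),
      (l.foldl dAddP e).foldl dAddP d = l.foldl dAddP (e.foldl dAddP d) := by
  induction l with
  | nil => intro e d; simp
  | cons x t ih =>
    intro e d
    rw [List.foldl_cons, ih (dAddP e x) d,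
        show dAddP e x = dAdd e x.1 x.2 from rfl, foldl_dAddP_dAdd e d x.1 x.2]
    rfl

-- aggregating into empty, then merging into d = aggregating directly into d
theorem foldl_agg_merge (l d : List (Int × Int)) :
    (l.foldl dAddP []).foldl dAddP d = l.foldl dAddP d := by
  rw [foldl_dAddP_of_foldl]; rfl

-- A's loop reduced to the canonical form -------------------------------------

theorem pvStepA_eq (row : String) (st : Int × List (Int × Int)) (kv : Int × Int) :
    pvStepA row st kv =
      (st.1 + (if PySem.Str.pyGet? row kv.1 = some '^' then kv.2 else 0),
        (pvContrib row kv).foldl dAddP st.2) := by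
  by_cases h : PySem.List.pyGet? row.toList kv.1 = some '^'
  · simp [pvStepA, pvContrib, pvBumpA_eq, h]
    split_ifs <;> simp [dAddP]
  · simp [pvStepA, pvContrib, pvBumpA_eq, h, dAddP]

theorem pvLoopA_eq (row : String) (l : List (Int × Int)) :
    ∀ (t : Int) (d : List (Int × Int)),
      l.foldl (pvStepA row) (t, d) =
        (t + pvT row l, (l.flatMap (pvContrib row)).foldl dAddP d) := by
  induction l with
  | nil => intro t d; simp [pvT]
  | cons kv l ih =>
    intro t d
    rw [List.foldl_cons, pvStepA_eq, ih]
    by_cases h : PySem.List.pyGet? row.toList kv.1 = some '^' <;>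
      simp [pvT, h, List.foldl_append, add_assoc]

-- B's recursion reduced to the same canonical form ----------------------------

theorem pvSolve_leaf (row : String) (k c : Int) :
    pvSolve row [(k, c)] = (pvT row [(k, c)], pvAgg row [(k, c)]) := by
  rw [pvSolve]
  by_cases hc : PySem.List.pyGet? row.toList k = some '^'
  · have hne2 : (k - 1 = k + 1) = False := by simp; omega
    by_cases hl : 0 < k <;> by_cases hr : k < (row.length : Int) - 1 <;>
      simp [hc, hl, hr, pvT, pvAgg, pvContrib, dAddP, dAdd, dSet, hne2]
  · simp [hc, pvT, pvAgg, pvContrib, dAddP, dAdd]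

theorem pvSolve_eq (row : String) :
    ∀ (n : Nat) (items : List (Int × Int)), items.length ≤ n → items ≠ [] →
      pvSolve row items = (pvT row items, pvAgg row items) := by
  intro n
  induction n with
  | zero => intro items h hne; cases items with
    | nil => exact absurd rfl hne
    | cons x t => simp at h
  | succ n ih =>
    intro items hlen hne
    by_cases h1 : items.length ≤ 1
    · cases items with
      | nil => exact absurd rfl hne
      | cons kv t =>
        obtain ⟨k, c⟩ := kv
        have ht : t = [] := by
          cases t with
          | nil => rfl
          | cons _ _ => simp at h1
        subst ht
        exact pvSolve_leaf row k c
    · rw [pvSolve, dif_neg h1]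
      have h2 : 2 ≤ items.length := by omega
      have hlt : (items.take (items.length / 2)).length ≤ n := by
        simp only [List.length_take]; omega
      have hld : (items.drop (items.length / 2)).length ≤ n := by
        simp only [List.length_drop]; omega
      have hnt : items.take (items.length / 2) ≠ [] := by
        rw [ne_eq, List.take_eq_nil_iff]
        push Not
        exact ⟨by omega, hne⟩
      have hnd : items.drop (items.length / 2) ≠ [] := by
        rw [ne_eq, List.drop_eq_nil_iff]; omega
      show ((pvSolve row (items.take (items.length / 2))).1
              + (pvSolve row (items.drop (items.length / 2))).1,
            (pvSolve row (items.drop (items.length / 2))).2.foldl pvMergeStep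
              (pvSolve row (items.take (items.length / 2))).2)
          = (pvT row items, pvAgg row items)
      rw [ih _ hlt hnt, ih _ hld hnd]
      have hsplit : items.take (items.length / 2) ++ items.drop (items.length / 2) = items :=
        List.take_append_drop _ items
      have hT : pvT row (items.take (items.length / 2)) + pvT row (items.drop (items.length / 2))
          = pvT row items := by
        conv_rhs => rw [← hsplit]
        rw [pvT, pvT, pvT, List.filter_append, List.map_append, List.sum_append]
      have hms : pvMergeStep = dAddP := by
        funext d kv; exact pvMergeStep_eq d kv
      have hA : (pvAgg row (items.drop (items.length / 2))).foldl dAddP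
          (pvAgg row (items.take (items.length / 2))) = pvAgg row items := by
        simp only [pvAgg]
        rw [foldl_agg_merge]
        conv_rhs => rw [← hsplit]
        rw [List.flatMap_append, List.foldl_append]
      rw [hms, hT, hA]

-- ===== VERDICT (by name: the statement is the Claim_ definition above) =====
theorem split_timelines_spec : Claim_equal_split_timelines := by
  intro m row _ _
  unfold Spec_split_timelines split_timelines split_timelines_alt
  by_cases hm : m = []
  · simp [hm]
  · simp only [hm, if_false]
    rw [pvLoopA_eq, pvSolve_eq row m.length m le_rfl hm, zero_add]
    rfl
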